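-- pv_equiv track=rewrite | github.com/ahmeddyounis/reflexor | tests/unit/test_policy_architecture.py | _find_first_cycle
-- ===== SOURCE A (Python) =====
-- def _find_first_cycle(graph: dict[str, set[str]]) -> list[str] | None:
--     visited: set[str] = set()
--     stack: set[str] = set()
--     path: list[str] = []
--
--     def dfs(node: str) -> list[str] | None:
--         visited.add(node)
--         stack.add(node)
--         path.append(node)
--         for neighbor in sorted(graph.get(node, set())):
--             if neighbor not in visited:
--                 cycle = dfs(neighbor)
--                 if cycle is not None:
--                     return cycle
--             elif neighbor in stack:
--                 idx = path.index(neighbor)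
--                 return path[idx:] + [neighbor]
--         stack.remove(node)
--         path.pop()
--         return None
--
--     for start in sorted(graph):
--         if start in visited:
--             continue
--         cycle = dfs(start)
--         if cycle is not None:
--             return cycle
--     return None
-- ===== SOURCE B (Python) =====
-- def _find_first_cycle(graph: dict[str, set[str]]) -> list[str] | None:
--     # Iterative DFS with an explicit stack of (node, neighbor-iterator) frames
--     # instead of the recursive helper; same sorted visiting order, same cycle.
--     visited: set[str] = set()
--     on_stack: set[str] = set()
--     path: list[str] = []
--
--     for start in sorted(graph):
--         if start in visited:
--             continue
--         visited.add(start)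
--         on_stack.add(start)
--         path.append(start)
--         frames = [(start, iter(sorted(graph.get(start, set()))))]
--         while frames:
--             node, it = frames[-1]
--             nb = next(it, None)
--             if nb is None:
--                 on_stack.remove(node)
--                 path.pop()
--                 frames.pop()
--             elif nb not in visited:
--                 visited.add(nb)
--                 on_stack.add(nb)
--                 path.append(nb)
--                 frames.append((nb, iter(sorted(graph.get(nb, set())))))
--             elif nb in on_stack:
--                 return path[path.index(nb):] + [nb]
--     return None
-- ===== Notes on version B (the rewrite author's own statement) =====
-- stated objective: alternative
-- what changed: The recursive DFS helper (with nonlocal visited/stack/path sets) is replaced by an iterative DFS driven by an explicit stack of (node, neighbor-iterator) frames inside a single loop, preserving the sorted visiting order and the first cycle returned.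
import Mathlib
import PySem

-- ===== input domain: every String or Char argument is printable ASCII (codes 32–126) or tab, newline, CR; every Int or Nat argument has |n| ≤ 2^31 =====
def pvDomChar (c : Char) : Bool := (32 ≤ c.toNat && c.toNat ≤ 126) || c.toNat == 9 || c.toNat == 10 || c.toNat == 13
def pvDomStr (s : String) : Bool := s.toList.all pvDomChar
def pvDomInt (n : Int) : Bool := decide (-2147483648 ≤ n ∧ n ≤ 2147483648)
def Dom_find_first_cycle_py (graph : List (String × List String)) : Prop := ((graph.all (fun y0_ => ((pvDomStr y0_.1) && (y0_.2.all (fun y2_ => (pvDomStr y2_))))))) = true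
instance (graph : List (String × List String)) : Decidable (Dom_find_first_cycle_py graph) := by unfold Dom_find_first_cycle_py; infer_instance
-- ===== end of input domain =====

-- B replaces the recursive DFS helper by an iterative DFS over an explicit stack of
-- (node, remaining-neighbors) frames: a different decomposition of the same search.


-- shared read-only helpers (sorted(graph) and sorted(graph.get(node, set())))
def pvKeysSorted (graph : List (String × List String)) : List String :=
  PySem.List.sorted (graph.map (fun kv => kv.1)) (fun x => x) false

def pvNbrsSorted (graph : List (String × List String)) (node : String) : List String :=
  PySem.List.sorted (PySem.Dict.getD (PySem.Dict.mk graph) node []) (fun x => x) false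

-- termination bookkeeping: all node names that can ever be marked visited,
-- and the count of them not yet visited (both ports recurse on this measure)
def pvAllNodes (graph : List (String × List String)) : List String :=
  PySem.Set.ofList (graph.map (fun kv => kv.1) ++ graph.flatMap (fun kv => kv.2))

def pvMeas (graph : List (String × List String)) (v : List String) : Nat :=
  ((pvAllNodes graph).filter (fun x => decide (x ∉ v))).length

theorem pvMeas_le (graph : List (String × List String)) {v w : List String}
    (h : ∀ x ∈ v, x ∈ w) : pvMeas graph w ≤ pvMeas graph v := by
  simp only [pvMeas, ← List.countP_eq_length_filter]
  refine List.countP_mono_left (fun x _ hx => ?_)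
  simp only [decide_eq_true_eq] at *
  exact fun hv => hx (h x hv)

theorem pvMeas_add_lt (graph : List (String × List String)) {v : List String} {x : String}
    (hx : x ∈ pvAllNodes graph) (hnx : x ∉ v) :
    pvMeas graph (PySem.Set.add v x) < pvMeas graph v := by
  simp only [pvMeas, ← List.countP_eq_length_filter]
  obtain ⟨l₁, l₂, heq⟩ := List.append_of_mem hx
  rw [heq]
  simp only [List.countP_append, List.countP_cons]
  have h1 : ∀ (l : List String), List.countP (fun y => decide (y ∉ PySem.Set.add v x)) l ≤
      List.countP (fun y => decide (y ∉ v)) l := fun l =>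
    List.countP_mono_left (fun y _ hy => by
      simp only [decide_eq_true_eq, PySem.Set.mem_add] at *
      exact fun hv => hy (Or.inl hv))
  have hx1 : (decide (x ∉ PySem.Set.add v x)) = false := by
    simp [PySem.Set.mem_add]
  have hx2 : (decide (x ∉ v)) = true := by simpa using hnx
  have := h1 l₁; have := h1 l₂
  rw [hx1, hx2]
  rw [if_neg Bool.false_ne_true, if_pos rfl]
  omega

theorem pvMeas_add_le (graph : List (String × List String)) (v : List String) (x : String) :
    pvMeas graph (PySem.Set.add v x) ≤ pvMeas graph v :=
  pvMeas_le graph (fun y hy => (PySem.Set.mem_add v x y).mpr (Or.inl hy))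

theorem pvGetD_mk_subset (graph : List (String × List String)) (node : String) :
    ∀ x ∈ PySem.Dict.getD (PySem.Dict.mk graph) node [], x ∈ graph.flatMap (fun kv => kv.2) := by
  induction graph with
  | nil => intro x hx; simp [PySem.Dict.getD, PySem.Dict.get?] at hx
  | cons kv rest ih =>
    intro x hx
    obtain ⟨k, vlist⟩ := kv
    simp only [PySem.Dict.getD, PySem.Dict.get?_mk_cons] at hx ih
    by_cases hk : (k == node) = true
    · simp only [hk, if_pos, Option.getD_some] at hx
      simp [List.flatMap_cons, hx]
    · simp only [hk, if_neg, Bool.false_eq_true, not_false_iff] at hx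
      simp only [List.flatMap_cons, List.mem_append]
      exact Or.inr (ih x hx)

theorem pvNbrs_sub (graph : List (String × List String)) (node : String) :
    ∀ x ∈ pvNbrsSorted graph node, x ∈ pvAllNodes graph := by
  intro x hx
  rw [pvNbrsSorted, PySem.List.mem_sorted] at hx
  rw [pvAllNodes, PySem.Set.mem_ofList, List.mem_append]
  exact Or.inr (pvGetD_mk_subset graph node x hx)

-- ===== PORT A =====
-- literal port of the recursive dfs: state is (found cycle, visited, stack, path);
-- the subtype records 'visited only grows' (used for termination only).
-- Python's stack.remove(node) / path.index(neighbor) cannot fail there (node is on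
-- the stack, neighbor is on the path); remove?.getD / index?.getD 0 keep them total.
abbrev PvSt := Option (List String) × List String × List String × List String

mutual
def pv_dfsA (graph : List (String × List String)) (node : String) (v s p : List String) :
    {r : PvSt // ∀ x ∈ PySem.Set.add v node, x ∈ r.2.1} :=
  let q := pv_goA graph node (pvNbrsSorted graph node)
      (PySem.Set.add v node) (PySem.Set.add s node) (p ++ [node]) (pvNbrs_sub graph node)
  ⟨q.val, q.property⟩
termination_by (pvMeas graph (PySem.Set.add v node), 1, 0)

def pv_goA (graph : List (String × List String)) (node : String) (nbrs : List String)
    (v s p : List String) (h : ∀ x ∈ nbrs, x ∈ pvAllNodes graph) :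
    {r : PvSt // ∀ x ∈ v, x ∈ r.2.1} :=
  match nbrs with
  | [] => ⟨(none, v, (PySem.Set.remove? s node).getD s, p.dropLast), fun _ hx => hx⟩
  | nb :: rest =>
    if hv : nb ∉ v then
      have hlt : pvMeas graph (PySem.Set.add v nb) < pvMeas graph v :=
        pvMeas_add_lt graph (h nb List.mem_cons_self) hv
      let c := pv_dfsA graph nb v s p
      have _hlt2 : pvMeas graph c.val.2.1 < pvMeas graph v :=
        lt_of_le_of_lt (pvMeas_le graph c.property) hlt
      match c.val.1 with
      | some cyc =>
        ⟨(some cyc, c.val.2.1, c.val.2.2.1, c.val.2.2.2), fun x hx =>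
          c.property x ((PySem.Set.mem_add v nb x).mpr (Or.inl hx))⟩
      | none =>
        let q := pv_goA graph node rest c.val.2.1 c.val.2.2.1 c.val.2.2.2
          (fun x hx => h x (List.mem_cons_of_mem nb hx))
        ⟨q.val, fun x hx =>
          q.property x (c.property x ((PySem.Set.mem_add v nb x).mpr (Or.inl hx)))⟩
    else if nb ∈ s then
      ⟨(some (PySem.List.slice p (some (((PySem.List.index? p nb).getD 0 : Nat) : Int)) none
          ++ [nb]), v, s, p), fun _ hx => hx⟩
    else
      pv_goA graph node rest v s p (fun x hx => h x (List.mem_cons_of_mem nb hx))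
termination_by (pvMeas graph v, 0, nbrs.length)
end

def pv_outerA (graph : List (String × List String)) (starts : List String)
    (v s p : List String) : Option (List String) :=
  match starts with
  | [] => none
  | st :: rest =>
    if st ∈ v then pv_outerA graph rest v s p
    else
      let c := pv_dfsA graph st v s p
      have hle : pvMeas graph c.val.2.1 + rest.length < pvMeas graph v + (st :: rest).length := by
        have := le_trans (pvMeas_le graph c.property) (pvMeas_add_le graph v st)
        simp only [List.length_cons]; omega
      match c.val.1 with
      | some cyc => some cyc
      | none => pv_outerA graph rest c.val.2.1 c.val.2.2.1 c.val.2.2.2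
termination_by pvMeas graph v + starts.length

def find_first_cycle_py (graph : List (String × List String)) : Option (List String) :=
  pv_outerA graph (pvKeysSorted graph) [] [] []

-- ===== PORT B =====
def pv_runB (graph : List (String × List String)) (frames : List (String × List String))
    (v s p : List String) (H : ∀ fr ∈ frames, ∀ x ∈ fr.2, x ∈ pvAllNodes graph) :
    {r : PvSt // ∀ x ∈ v, x ∈ r.2.1} :=
  match frames with
  | [] => ⟨(none, v, s, p), fun _ hx => hx⟩
  | (node, nbrs) :: rest =>
    match nbrs with
    | [] =>
      pv_runB graph rest v ((PySem.Set.remove? s node).getD s) p.dropLast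
        (fun fr hfr => H fr (List.mem_cons_of_mem _ hfr))
    | nb :: more =>
      if hv : nb ∉ v then
        have hlt : pvMeas graph (PySem.Set.add v nb) < pvMeas graph v :=
          pvMeas_add_lt graph
            (H (node, nb :: more) List.mem_cons_self nb List.mem_cons_self) hv
        let q := pv_runB graph ((nb, pvNbrsSorted graph nb) :: (node, more) :: rest)
          (PySem.Set.add v nb) (PySem.Set.add s nb) (p ++ [nb])
          (by
            intro fr hfr x hx
            rcases List.mem_cons.mp hfr with rfl | hfr
            · exact pvNbrs_sub graph nb x hx
            · rcases List.mem_cons.mp hfr with rfl | hfr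
              · exact H (node, nb :: more) List.mem_cons_self x (List.mem_cons_of_mem nb hx)
              · exact H fr (List.mem_cons_of_mem _ hfr) x hx)
        ⟨q.val, fun x hx => q.property x ((PySem.Set.mem_add v nb x).mpr (Or.inl hx))⟩
      else if nb ∈ s then
        ⟨(some (PySem.List.slice p (some (((PySem.List.index? p nb).getD 0 : Nat) : Int)) none
            ++ [nb]), v, s, p), fun _ hx => hx⟩
      else
        pv_runB graph ((node, more) :: rest) v s p
          (by
            intro fr hfr x hx
            rcases List.mem_cons.mp hfr with rfl | hfr
            · exact H (node, nb :: more) List.mem_cons_self x (List.mem_cons_of_mem nb hx)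
            · exact H fr (List.mem_cons_of_mem _ hfr) x hx)
termination_by (pvMeas graph v, (frames.map (fun fr => fr.2.length + 1)).sum)

def pv_outerB (graph : List (String × List String)) (starts : List String)
    (v s p : List String) : Option (List String) :=
  match starts with
  | [] => none
  | st :: rest =>
    if st ∈ v then pv_outerB graph rest v s p
    else
      let q := pv_runB graph [(st, pvNbrsSorted graph st)]
        (PySem.Set.add v st) (PySem.Set.add s st) (p ++ [st])
        (by
          intro fr hfr x hx
          rcases List.mem_cons.mp hfr with rfl | hfr
          · exact pvNbrs_sub graph st x hx
          · simp at hfr)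
      have hle : pvMeas graph q.val.2.1 + rest.length < pvMeas graph v + (st :: rest).length := by
        have := le_trans (pvMeas_le graph q.property) (pvMeas_add_le graph v st)
        simp only [List.length_cons]; omega
      match q.val.1 with
      | some cyc => some cyc
      | none => pv_outerB graph rest q.val.2.1 q.val.2.2.1 q.val.2.2.2
termination_by pvMeas graph v + starts.length

def find_first_cycle_py_alt (graph : List (String × List String)) : Option (List String) :=
  pv_outerB graph (pvKeysSorted graph) [] [] []


-- ===== PRECONDITION & SPEC =====
def Spec_find_first_cycle_py (graph : List (String × List String)) (out : Option (List String)) : Prop := out = find_first_cycle_py_alt graph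
instance (graph : List (String × List String)) (out : Option (List String)) : Decidable (Spec_find_first_cycle_py graph out) := by unfold Spec_find_first_cycle_py; infer_instance

-- ===== CLAIM =====
def Claim_equal_find_first_cycle_py : Prop := ∀ (graph : List (String × List String)), Dom_find_first_cycle_py graph → Spec_find_first_cycle_py graph (find_first_cycle_py graph)

-- ===== LEMMAS AND PROOFS =====
theorem pv_goA_skip (graph : List (String × List String)) (node nb : String)
    (more v s p : List String) (h : ∀ x ∈ nb :: more, x ∈ pvAllNodes graph)
    (hv : nb ∈ v) (hs : nb ∉ s) :
    (pv_goA graph node (nb :: more) v s p h).val =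
      (pv_goA graph node more v s p (fun x hx => h x (List.mem_cons_of_mem _ hx))).val := by
  rw [pv_goA]
  simp [hv, hs]

theorem pv_goA_cycle (graph : List (String × List String)) (node nb : String)
    (more v s p : List String) (h : ∀ x ∈ nb :: more, x ∈ pvAllNodes graph)
    (hv : nb ∈ v) (hs : nb ∈ s) :
    (pv_goA graph node (nb :: more) v s p h).val =
      (some (PySem.List.slice p (some (((PySem.List.index? p nb).getD 0 : Nat) : Int)) none
        ++ [nb]), v, s, p) := by
  rw [pv_goA]
  simp [hv, hs]

theorem pv_goA_new (graph : List (String × List String)) (node nb : String)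
    (more v s p : List String) (h : ∀ x ∈ nb :: more, x ∈ pvAllNodes graph)
    (hv : nb ∉ v) :
    (pv_goA graph node (nb :: more) v s p h).val =
      (match (pv_dfsA graph nb v s p).val.1 with
       | some cyc => (some cyc, (pv_dfsA graph nb v s p).val.2.1,
           (pv_dfsA graph nb v s p).val.2.2.1, (pv_dfsA graph nb v s p).val.2.2.2)
       | none =>
         (pv_goA graph node more (pv_dfsA graph nb v s p).val.2.1
           (pv_dfsA graph nb v s p).val.2.2.1 (pv_dfsA graph nb v s p).val.2.2.2
           (fun x hx => h x (List.mem_cons_of_mem _ hx))).val) := by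
  rw [pv_goA]
  simp only [dif_pos hv]
  cases hc : (pv_dfsA graph nb v s p).val.1 with
  | some cyc => rfl
  | none => rfl

theorem pv_dfsA_val (graph : List (String × List String)) (node : String) (v s p : List String) :
    (pv_dfsA graph node v s p).val =
      (pv_goA graph node (pvNbrsSorted graph node) (PySem.Set.add v node) (PySem.Set.add s node)
        (p ++ [node]) (pvNbrs_sub graph node)).val := by
  rw [pv_dfsA]

theorem pv_runB_skip (graph : List (String × List String)) (node nb : String)
    (more : List String) (rest : List (String × List String)) (v s p : List String)
    (H : ∀ fr ∈ (node, nb :: more) :: rest, ∀ x ∈ fr.2, x ∈ pvAllNodes graph)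
    (hv : nb ∈ v) (hs : nb ∉ s) :
    (pv_runB graph ((node, nb :: more) :: rest) v s p H).val =
      (pv_runB graph ((node, more) :: rest) v s p
        (by
          intro fr hfr x hx
          rcases List.mem_cons.mp hfr with rfl | hfr
          · exact H (node, nb :: more) List.mem_cons_self x (List.mem_cons_of_mem nb hx)
          · exact H fr (List.mem_cons_of_mem _ hfr) x hx)).val := by
  rw [pv_runB]
  simp [hv, hs]

theorem pv_runB_cycle (graph : List (String × List String)) (node nb : String)
    (more : List String) (rest : List (String × List String)) (v s p : List String)
    (H : ∀ fr ∈ (node, nb :: more) :: rest, ∀ x ∈ fr.2, x ∈ pvAllNodes graph)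
    (hv : nb ∈ v) (hs : nb ∈ s) :
    (pv_runB graph ((node, nb :: more) :: rest) v s p H).val =
      (some (PySem.List.slice p (some (((PySem.List.index? p nb).getD 0 : Nat) : Int)) none
        ++ [nb]), v, s, p) := by
  rw [pv_runB]
  simp [hv, hs]

theorem pv_runB_push (graph : List (String × List String)) (node nb : String)
    (more : List String) (rest : List (String × List String)) (v s p : List String)
    (H : ∀ fr ∈ (node, nb :: more) :: rest, ∀ x ∈ fr.2, x ∈ pvAllNodes graph)
    (hv : nb ∉ v) :
    (pv_runB graph ((node, nb :: more) :: rest) v s p H).val =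
      (pv_runB graph ((nb, pvNbrsSorted graph nb) :: (node, more) :: rest)
        (PySem.Set.add v nb) (PySem.Set.add s nb) (p ++ [nb])
        (by
          intro fr hfr x hx
          rcases List.mem_cons.mp hfr with rfl | hfr
          · exact pvNbrs_sub graph nb x hx
          · rcases List.mem_cons.mp hfr with rfl | hfr
            · exact H (node, nb :: more) List.mem_cons_self x (List.mem_cons_of_mem nb hx)
            · exact H fr (List.mem_cons_of_mem _ hfr) x hx)).val := by
  rw [pv_runB]
  simp only [dif_pos hv]

theorem pv_sim (graph : List (String × List String)) (node : String) (nbrs : List String)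
    (rest : List (String × List String)) (v s p : List String)
    (h : ∀ x ∈ nbrs, x ∈ pvAllNodes graph)
    (H : ∀ fr ∈ (node, nbrs) :: rest, ∀ x ∈ fr.2, x ∈ pvAllNodes graph) :
    (pv_runB graph ((node, nbrs) :: rest) v s p H).val =
      (match (pv_goA graph node nbrs v s p h).val.1 with
       | some _ => (pv_goA graph node nbrs v s p h).val
       | none =>
         (pv_runB graph rest (pv_goA graph node nbrs v s p h).val.2.1
           (pv_goA graph node nbrs v s p h).val.2.2.1
           (pv_goA graph node nbrs v s p h).val.2.2.2
           (fun fr hfr => H fr (List.mem_cons_of_mem _ hfr))).val) := by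
  cases nbrs with
  | nil =>
    rw [pv_runB, pv_goA]
  | cons nb more =>
    by_cases hv : nb ∈ v
    · by_cases hs : nb ∈ s
      · rw [pv_runB_cycle graph node nb more rest v s p H hv hs,
          pv_goA_cycle graph node nb more v s p h hv hs]
      · rw [pv_runB_skip graph node nb more rest v s p H hv hs,
          pv_goA_skip graph node nb more v s p h hv hs]
        exact pv_sim graph node more rest v s p
          (fun x hx => h x (List.mem_cons_of_mem _ hx))
          (by
            intro fr hfr x hx
            rcases List.mem_cons.mp hfr with rfl | hfr
            · exact H (node, nb :: more) List.mem_cons_self x (List.mem_cons_of_mem nb hx)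
            · exact H fr (List.mem_cons_of_mem _ hfr) x hx)
    · have hlt : pvMeas graph (PySem.Set.add v nb) < pvMeas graph v :=
        pvMeas_add_lt graph (h nb List.mem_cons_self) hv
      rw [pv_runB_push graph node nb more rest v s p H hv,
        pv_goA_new graph node nb more v s p h hv]
      rw [pv_sim graph nb (pvNbrsSorted graph nb) ((node, more) :: rest)
        (PySem.Set.add v nb) (PySem.Set.add s nb) (p ++ [nb]) (pvNbrs_sub graph nb)
        (by
          intro fr hfr x hx
          rcases List.mem_cons.mp hfr with rfl | hfr
          · exact pvNbrs_sub graph nb x hx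
          · rcases List.mem_cons.mp hfr with rfl | hfr
            · exact H (node, nb :: more) List.mem_cons_self x (List.mem_cons_of_mem nb hx)
            · exact H fr (List.mem_cons_of_mem _ hfr) x hx)]
      rw [← pv_dfsA_val graph nb v s p]
      have hprop := (pv_dfsA graph nb v s p).property
      cases hc : (pv_dfsA graph nb v s p).val.1 with
      | some cyc =>
        simp only [hc]
        rw [← hc]
      | none =>
        have hlt2 : pvMeas graph (pv_dfsA graph nb v s p).val.2.1 < pvMeas graph v :=
          lt_of_le_of_lt (pvMeas_le graph hprop) hlt
        exact pv_sim graph node more rest (pv_dfsA graph nb v s p).val.2.1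
          (pv_dfsA graph nb v s p).val.2.2.1 (pv_dfsA graph nb v s p).val.2.2.2
          (fun x hx => h x (List.mem_cons_of_mem _ hx))
          (by
            intro fr hfr x hx
            rcases List.mem_cons.mp hfr with rfl | hfr
            · exact H (node, nb :: more) List.mem_cons_self x (List.mem_cons_of_mem nb hx)
            · exact H fr (List.mem_cons_of_mem _ hfr) x hx)
termination_by (pvMeas graph v, nbrs.length)

theorem pv_outerB_eq (graph : List (String × List String)) (starts : List String) :
    ∀ v s p : List String, pv_outerB graph starts v s p = pv_outerA graph starts v s p := by
  induction starts with
  | nil => intro v s p; rw [pv_outerB, pv_outerA]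
  | cons st rest ih =>
    intro v s p
    by_cases hst : st ∈ v
    · rw [pv_outerB, pv_outerA]
      simp [hst, ih]
    · rw [pv_outerB, pv_outerA]
      simp only [if_neg hst]
      rw [pv_sim graph st (pvNbrsSorted graph st) [] (PySem.Set.add v st) (PySem.Set.add s st)
        (p ++ [st]) (pvNbrs_sub graph st)
        (by
          intro fr hfr x hx
          rcases List.mem_cons.mp hfr with rfl | hfr
          · exact pvNbrs_sub graph st x hx
          · simp at hfr)]
      rw [← pv_dfsA_val graph st v s p]
      cases hc : (pv_dfsA graph st v s p).val.1 with
      | some cyc => simp only [hc]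
      | none => simp only [pv_runB, ih]

-- ===== VERDICT =====
theorem find_first_cycle_py_spec : Claim_equal_find_first_cycle_py := by
  intro graph _
  unfold Spec_find_first_cycle_py
  rw [find_first_cycle_py, find_first_cycle_py_alt, pv_outerB_eq]
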